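-- pv_equiv track=rewrite | github.com/talhajamal11/mathematical_modelling | src/JP Morgan Quant Questions/is_possible.py | solution
-- ===== SOURCE A (Python) =====
-- def solution(a,b,c,d):
--     while c > 0 and d > 0:
--         if (c,d) == (a,b):
--             return True
--         if c > d:
--             c %= d
--         else:
--             d %= c
--     return False
-- ===== SOURCE B (Python) =====
-- def _pairs(c, d):
--     # all positive pairs visited by the Euclidean reduction of (c, d)
--     if c <= 0 or d <= 0:
--         return []
--     return [(c, d)] + (_pairs(c % d, d) if c > d else _pairs(c, d % c))
--
-- def solution(a, b, c, d):
--     return (a, b) in _pairs(c, d)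
-- ===== Notes on version B (the rewrite author's own statement) =====
-- stated objective: alternative
-- what changed: Replaces the fused while loop (test-then-reduce with mutation) by a recursive generator of the Euclidean reduction sequence followed by a membership test.
import Mathlib
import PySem

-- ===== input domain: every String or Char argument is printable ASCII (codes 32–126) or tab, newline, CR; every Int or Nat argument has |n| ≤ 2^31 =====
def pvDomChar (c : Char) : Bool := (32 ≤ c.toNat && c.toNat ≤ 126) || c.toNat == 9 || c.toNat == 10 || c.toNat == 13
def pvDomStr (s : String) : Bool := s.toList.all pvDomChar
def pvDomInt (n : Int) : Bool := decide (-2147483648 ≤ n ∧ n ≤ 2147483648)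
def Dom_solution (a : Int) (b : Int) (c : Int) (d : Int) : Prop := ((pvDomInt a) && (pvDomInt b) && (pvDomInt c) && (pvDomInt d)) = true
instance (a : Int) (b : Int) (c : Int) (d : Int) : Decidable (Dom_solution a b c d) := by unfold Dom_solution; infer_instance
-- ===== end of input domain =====

-- B replaces A's fused while loop (test-then-reduce) by a recursive generator of the
-- Euclidean reduction sequence followed by a membership test (objective: alternative).

-- ===== PORT A =====
-- A: literal port of the while loop as structural recursion on the same state.
def solutionLoop (a : Int) (b : Int) (c : Int) (d : Int) : Bool :=
  if h : c > 0 ∧ d > 0 then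
    if (c, d) = (a, b) then true
    else if hcd : c > d then solutionLoop a b (PySem.Int.mod c d) d
    else solutionLoop a b c (PySem.Int.mod d c)
  else false
termination_by (c + d).toNat
decreasing_by
  · have := PySem.Int.mod_eq_emod_of_pos (a:=c) (b:=d) h.2
    have h1 := Int.emod_nonneg c (by omega : d ≠ 0)
    have h2 := Int.emod_lt_of_pos c h.2
    omega
  · have := PySem.Int.mod_eq_emod_of_pos (a:=d) (b:=c) h.1
    have h1 := Int.emod_nonneg d (by omega : c ≠ 0)
    have h2 := Int.emod_lt_of_pos d h.1
    omega

def solution (a : Int) (b : Int) (c : Int) (d : Int) : Bool :=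
  solutionLoop a b c d

-- ===== PORT B =====
-- B: recursively build the list of visited positive pairs, then test membership.
def pairsSeq (c : Int) (d : Int) : List (Int × Int) :=
  if h : c ≤ 0 ∨ d ≤ 0 then []
  else (c, d) :: (if hcd : c > d then pairsSeq (PySem.Int.mod c d) d else pairsSeq c (PySem.Int.mod d c))
termination_by (c + d).toNat
decreasing_by
  · have hm : PySem.Int.mod c d = c % d := PySem.Int.mod_eq_emod_of_pos (by omega)
    have h1 := Int.emod_nonneg c (show d ≠ 0 by omega)
    have h2 := Int.emod_lt_of_pos c (show (0:Int) < d by omega)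
    omega
  · have hm : PySem.Int.mod d c = d % c := PySem.Int.mod_eq_emod_of_pos (by omega)
    have h1 := Int.emod_nonneg d (show c ≠ 0 by omega)
    have h2 := Int.emod_lt_of_pos d (show (0:Int) < c by omega)
    omega

def solution_alt (a : Int) (b : Int) (c : Int) (d : Int) : Bool :=
  decide ((a, b) ∈ pairsSeq c d)

-- ===== PRECONDITION & SPEC =====
def Spec_solution (a : Int) (b : Int) (c : Int) (d : Int) (out : Bool) : Prop := out = solution_alt a b c d
instance (a : Int) (b : Int) (c : Int) (d : Int) (out : Bool) : Decidable (Spec_solution a b c d out) := by unfold Spec_solution; infer_instance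

-- ===== CLAIM (what is proved, stated in full; the proofs are below) =====
def Claim_equal_solution : Prop := ∀ (a : Int) (b : Int) (c : Int) (d : Int), Dom_solution a b c d → Spec_solution a b c d (solution a b c d)

-- ===== LEMMAS AND PROOFS =====

-- ===== VERDICT (by name: the statement is the Claim_ definition above) =====
lemma loop_eq_mem (n : Nat) : ∀ (a b c d : Int), (c + d).toNat < n →
    solutionLoop a b c d = decide ((a, b) ∈ pairsSeq c d) := by
  induction n with
  | zero => intro a b c d h; omega
  | succ n ih =>
    intro a b c d h
    rw [solutionLoop, pairsSeq]
    by_cases hg : c > 0 ∧ d > 0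
    · have hne : ¬ (c ≤ 0 ∨ d ≤ 0) := by omega
      simp only [dif_pos hg, dif_neg hne]
      by_cases heq : (c, d) = (a, b)
      · have : (a, b) = (c, d) := heq.symm
        simp [this]
      · rw [if_neg heq]
        by_cases hcd : c > d
        · have hm := PySem.Int.mod_eq_emod_of_pos (a:=c) (b:=d) hg.2
          have h1 := Int.emod_nonneg c (by omega : d ≠ 0)
          have h2 := Int.emod_lt_of_pos c hg.2
          rw [dif_pos hcd, dif_pos hcd, ih a b _ _ (by omega)]
          have hab : ¬ ((a, b) = (c, d)) := fun hx => heq hx.symm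
          simp [List.mem_cons, hab]
        · have hm := PySem.Int.mod_eq_emod_of_pos (a:=d) (b:=c) hg.1
          have h1 := Int.emod_nonneg d (by omega : c ≠ 0)
          have h2 := Int.emod_lt_of_pos d hg.1
          rw [dif_neg hcd, dif_neg hcd, ih a b _ _ (by omega)]
          have hab : ¬ ((a, b) = (c, d)) := fun hx => heq hx.symm
          simp [List.mem_cons, hab]
    · have hne : (c ≤ 0 ∨ d ≤ 0) := by omega
      simp [dif_neg hg, dif_pos hne]

theorem solution_spec : Claim_equal_solution := by
  intro a b c d _
  unfold Spec_solution solution solution_alt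
  exact loop_eq_mem ((c + d).toNat + 1) a b c d (by omega)
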